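-- pv_equiv track=rewrite | github.com/gamingflexer/meeting-summarization | src/models-api/views/extras.py | extract_speakers
-- ===== SOURCE A (Python) =====
-- from collections import defaultdict,Counter
--
-- def extract_speakers(text):
--     # extract speakers from conversation
--     speakers = defaultdict(int)
--     lines = text.split("\n")
--     for line in lines:
--         if ":" in line:
--             speaker, _ = line.split(":", 1)
--             speakers[speaker.strip()] += 1
--     return dict(speakers)
-- ===== SOURCE B (Python) =====
-- def extract_speakers(text):
--     # single left-to-right pass over the characters: a small state machine that
--     # buffers the prefix of the current line until its first colon, instead of
--     # splitting into lines and re-parsing each line.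
--     counts = {}
--     buf = []
--     seen = False
--     for ch in text:
--         if ch == "\n":
--             if seen:
--                 name = "".join(buf).strip()
--                 counts[name] = counts.get(name, 0) + 1
--             buf = []
--             seen = False
--         elif ch == ":":
--             seen = True
--         elif not seen:
--             buf.append(ch)
--     if seen:
--         name = "".join(buf).strip()
--         counts[name] = counts.get(name, 0) + 1
--     return counts
-- ===== Notes on version B (the rewrite author's own statement) =====
-- stated objective: alternative
-- what changed: Replaces splitting the text into lines and re-parsing each line (membership test plus a bounded split) with a single character-level state machine that streams over the text once, buffering each line's pre-colon prefix and flushing a count at every newline.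
import Mathlib
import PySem

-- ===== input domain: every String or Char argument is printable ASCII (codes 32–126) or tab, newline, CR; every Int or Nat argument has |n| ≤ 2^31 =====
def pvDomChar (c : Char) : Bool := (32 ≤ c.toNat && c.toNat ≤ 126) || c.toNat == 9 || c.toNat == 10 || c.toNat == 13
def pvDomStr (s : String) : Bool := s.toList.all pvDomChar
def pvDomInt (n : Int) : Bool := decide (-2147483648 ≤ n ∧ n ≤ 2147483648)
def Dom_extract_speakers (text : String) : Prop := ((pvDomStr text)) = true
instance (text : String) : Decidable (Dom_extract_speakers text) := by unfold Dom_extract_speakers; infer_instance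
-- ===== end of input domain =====

-- B replaces A's split-into-lines + per-line parsing with a single character-level
-- state machine over the text; same asymptotic cost, a genuinely different traversal.

-- ===== PORT A =====
def extract_speakers (text : String) : List (String × Int) :=
  let lines := (PySem.Str.split? text "\n").getD []
  (lines.foldl
      (fun d line =>
        if PySem.Str.isIn ":" line then
          d.modify (PySem.Str.strip (((PySem.Str.splitMax? line ":" 1).getD []).headD "")) 0 (· + 1)
        else d)
      (PySem.Dict.empty : PySem.Dict String Int)).items

-- ===== PORT B =====
-- one step of the scanner: state = (counts so far, buffer of the current line's
-- pre-colon prefix, whether a colon has been seen on the current line)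
def pvScanStep (st : PySem.Dict String Int × List Char × Bool) (ch : Char) :
    PySem.Dict String Int × List Char × Bool :=
  if ch = '\n' then
    (if st.2.2 then st.1.modify (PySem.Str.strip (String.ofList st.2.1)) 0 (· + 1) else st.1,
     [], false)
  else if ch = ':' then (st.1, st.2.1, true)
  else if !st.2.2 then (st.1, st.2.1 ++ [ch], st.2.2)
  else st

def extract_speakers_alt (text : String) : List (String × Int) :=
  let st := text.toList.foldl pvScanStep ((PySem.Dict.empty : PySem.Dict String Int), [], false)
  (if st.2.2 then st.1.modify (PySem.Str.strip (String.ofList st.2.1)) 0 (· + 1) else st.1).items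

-- ===== PRECONDITION & SPEC =====
def Spec_extract_speakers (text : String) (out : List (String × Int)) : Prop := out = extract_speakers_alt text
instance (text : String) (out : List (String × Int)) : Decidable (Spec_extract_speakers text out) := by unfold Spec_extract_speakers; infer_instance

-- ===== CLAIM (what is proved, stated in full; the proofs are below) =====
def Claim_equal_extract_speakers : Prop := ∀ (text : String), Dom_extract_speakers text → Spec_extract_speakers text (extract_speakers text)

-- ===== LEMMAS AND PROOFS =====

-- increment the count of the (stripped) name `cs`
def pvIncr (d : PySem.Dict String Int) (cs : List Char) : PySem.Dict String Int :=
  d.modify (String.ofList (PySem.Chars.strip cs)) 0 (· + 1)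

-- value obtained by flushing state (d, buf, seen) after the rest `r` of the current line
def pvLineVal (d : PySem.Dict String Int) (buf : List Char) (seen : Bool) (r : List Char) :
    PySem.Dict String Int :=
  if seen then pvIncr d buf
  else if ':' ∈ r then pvIncr d (buf ++ r.takeWhile (· ≠ ':')) else d

-- A's per-line step, on the line's characters
def pvStepLine (d : PySem.Dict String Int) (r : List Char) : PySem.Dict String Int :=
  pvLineVal d [] false r

def pvFlush (st : PySem.Dict String Int × List Char × Bool) : PySem.Dict String Int :=
  if st.2.2 then st.1.modify (PySem.Str.strip (String.ofList st.2.1)) 0 (· + 1) else st.1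

theorem pvFlush_eq (d : PySem.Dict String Int) (buf : List Char) (seen : Bool) :
    pvFlush (d, buf, seen) = if seen then pvIncr d buf else d := by
  simp [pvFlush, pvIncr, PySem.Str.strip]

-- PySem's fueled splitOn.go on a one-char separator computes Mathlib's splitOnP
theorem pvSplitOnGo (nl : Char) :
    ∀ (l : List Char) (fuel : Nat) (cur : List Char) (acc : List (List Char)),
      l.length ≤ fuel →
      PySem.Chars.splitOn.go [nl] fuel l cur acc
        = acc.reverse ++ (l.splitOnP (· == nl)).modifyHead (cur.reverse ++ ·) := by
  intro l
  induction l with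
  | nil =>
    intro fuel cur acc _
    cases fuel <;> simp [PySem.Chars.splitOn.go]
  | cons c rest ih =>
    intro fuel cur acc h
    cases fuel with
    | zero => simp at h
    | succ f =>
      have hf : rest.length ≤ f := by simpa using h
      by_cases hc : c = nl
      · subst hc
        have hp : List.isPrefixOf [c] (c :: rest) = true := by simp [List.isPrefixOf]
        simp only [PySem.Chars.splitOn.go, hp, if_true]
        rw [show List.drop [c].length (c :: rest) = rest from rfl]
        rw [ih f [] (cur.reverse :: acc) hf]
        simp only [List.splitOnP_cons, beq_self_eq_true, if_true,
          List.reverse_cons, List.append_assoc, List.modifyHead_cons]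
        cases hx : rest.splitOnP (fun x => x == c) <;> simp
      · have hp : List.isPrefixOf [nl] (c :: rest) = false := by
          simp [List.isPrefixOf]
          exact fun h' => absurd h'.symm hc
        simp only [PySem.Chars.splitOn.go, hp, Bool.false_eq_true, if_false]
        rw [ih f (c :: cur) acc hf]
        obtain ⟨a, t, hsp⟩ : ∃ a t, rest.splitOnP (· == nl) = a :: t := by
          cases hx : rest.splitOnP (· == nl) with
          | nil => exact absurd hx (List.splitOnP_ne_nil _ _)
          | cons a t => exact ⟨a, t, rfl⟩
        simp [List.splitOnP_cons, hc, hsp]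

theorem pvSplitOn_single (nl : Char) (l : List Char) :
    PySem.Chars.splitOn l [nl] = l.splitOnP (· == nl) := by
  unfold PySem.Chars.splitOn
  rw [pvSplitOnGo nl l (l.length + 1) [] [] (by omega)]
  obtain ⟨a, t, hsp⟩ : ∃ a t, l.splitOnP (· == nl) = a :: t := by
    cases hx : l.splitOnP (· == nl) with
    | nil => exact absurd hx (List.splitOnP_ne_nil _ _)
    | cons a t => exact ⟨a, t, rfl⟩
  simp [hsp]

-- value of splitOnMax.go with NO splits remaining
theorem pvSplitOnMaxGo_zero (fuel : Nat) (l cur : List Char) (acc : List (List Char)) :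
    PySem.Chars.splitOnMax.go [':'] fuel 0 l cur acc = acc.reverse ++ [cur.reverse ++ l] := by
  cases fuel <;> cases l <;> simp [PySem.Chars.splitOnMax.go]

-- the pieces after the first one, for `splitOnMax` with `m` further splits allowed
def pvMaxRest (m : Nat) (l : List Char) : List (List Char) :=
  match l with
  | [] => []
  | c :: rest =>
    if c = ':' then
      match m with
      | 0 => [rest]
      | m + 1 => rest.takeWhile (· ≠ ':') :: pvMaxRest m rest
    else pvMaxRest m rest

-- value of splitOnMax.go with m+1 splits remaining
theorem pvSplitOnMaxGo_succ :
    ∀ (l : List Char) (fuel m : Nat) (cur : List Char) (acc : List (List Char)),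
      l.length ≤ fuel →
      PySem.Chars.splitOnMax.go [':'] fuel (m + 1) l cur acc
        = acc.reverse ++ (cur.reverse ++ l.takeWhile (· ≠ ':')) :: pvMaxRest m l := by
  intro l
  induction l with
  | nil =>
    intro fuel m cur acc _
    cases fuel <;> simp [PySem.Chars.splitOnMax.go, pvMaxRest]
  | cons c rest ih =>
    intro fuel m cur acc h
    cases fuel with
    | zero => simp at h
    | succ f =>
      have hf : rest.length ≤ f := by simpa using h
      by_cases hc : c = ':'
      · subst hc
        have hp : List.isPrefixOf [':'] (':' :: rest) = true := by simp [List.isPrefixOf]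
        simp only [PySem.Chars.splitOnMax.go, hp, if_true, Nat.succ_ne_zero, if_false,
          Nat.add_sub_cancel]
        cases m with
        | zero =>
          rw [show List.drop [':'].length (':' :: rest) = rest from rfl]
          rw [pvSplitOnMaxGo_zero]
          simp [pvMaxRest]
        | succ m' =>
          rw [show List.drop [':'].length (':' :: rest) = rest from rfl]
          rw [ih f m' [] (cur.reverse :: acc) hf]
          simp [pvMaxRest]
      · have hp : List.isPrefixOf [':'] (c :: rest) = false := by
          simp [List.isPrefixOf]
          exact fun h' => absurd h'.symm hc
        simp only [PySem.Chars.splitOnMax.go, hp, Bool.false_eq_true, if_false,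
          Nat.succ_ne_zero]
        rw [ih f m (c :: cur) acc hf]
        have hr : pvMaxRest m (c :: rest) = pvMaxRest m rest := by
          simp [pvMaxRest, hc]
        simp [hc, hr]

-- `':' in r` as a membership fact
theorem pvIsIn_colon (r : List Char) : PySem.Chars.isIn [':'] r = (':' ∈ r : Bool) := by
  by_cases hm : ':' ∈ r
  · obtain ⟨s, t, rfl⟩ := List.append_of_mem hm
    have : PySem.Chars.isIn [':'] (s ++ ':' :: t) = true :=
      (PySem.Chars.isIn_iff_infix _ _).2 ⟨s, t, by simp⟩
    simp [this, hm]
  · have : PySem.Chars.isIn [':'] r = false := by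
      rw [PySem.Chars.isIn_eq_false_iff]
      intro ⟨s, t, hst⟩
      exact hm (by rw [← hst]; simp)
    simp [this, hm]

-- the scanner over any char list equals A's per-line fold over the split lines
theorem pvScan (l : List Char) :
    ∀ (d : PySem.Dict String Int) (buf : List Char) (seen : Bool),
      pvFlush (l.foldl pvScanStep (d, buf, seen))
        = ((l.splitOnP (· == '\n')).tail).foldl pvStepLine
            (pvLineVal d buf seen (l.splitOnP (· == '\n')).headI) := by
  induction l with
  | nil =>
    intro d buf seen
    simp [List.splitOnP_nil, pvFlush_eq, pvLineVal]
  | cons c rest ih =>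
    intro d buf seen
    obtain ⟨a, t, hsp⟩ : ∃ a t, rest.splitOnP (· == '\n') = a :: t := by
      cases hx : rest.splitOnP (· == '\n') with
      | nil => exact absurd hx (List.splitOnP_ne_nil _ _)
      | cons a t => exact ⟨a, t, rfl⟩
    by_cases hn : c = '\n'
    · subst hn
      have hstep : pvScanStep (d, buf, seen) '\n' = (pvFlush (d, buf, seen), [], false) := by
        simp [pvScanStep, pvFlush]
      rw [List.foldl_cons, hstep, ih, hsp]
      simp only [List.splitOnP_cons, beq_self_eq_true, if_true, List.tail_cons, List.headI, hsp]
      rw [List.foldl_cons]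
      congr 1
      rw [pvFlush_eq]
      simp [pvLineVal, pvStepLine]
    · have hsp' : (c :: rest).splitOnP (· == '\n') = (c :: a) :: t := by
        simp [List.splitOnP_cons, hn, hsp]
      rw [hsp']
      simp only [List.tail_cons, List.headI]
      by_cases hcol : c = ':'
      · subst hcol
        have hstep : pvScanStep (d, buf, seen) ':' = (d, buf, true) := by
          simp [pvScanStep]
        rw [List.foldl_cons, hstep, ih, hsp]
        simp only [List.tail_cons, List.headI]
        congr 1
        cases seen <;> simp [pvLineVal]
      · cases seen with
        | true =>
          have hstep : pvScanStep (d, buf, true) c = (d, buf, true) := by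
            simp [pvScanStep, hn, hcol]
          rw [List.foldl_cons, hstep, ih, hsp]
          simp [pvLineVal]
        | false =>
          have hstep : pvScanStep (d, buf, false) c = (d, buf ++ [c], false) := by
            simp [pvScanStep, hn, hcol]
          rw [List.foldl_cons, hstep, ih, hsp]
          simp only [List.tail_cons, List.headI]
          congr 1
          have hc2 : ¬(':' = c) := fun h => hcol h.symm
          by_cases hmem : ':' ∈ a
          · simp [pvLineVal, hmem, hcol, hc2]
          · simp [pvLineVal, hmem, hc2]

-- A's loop body, applied to a line given by its characters, is pvStepLine
theorem pvStepA_eq (d : PySem.Dict String Int) (r : List Char) :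
    (if PySem.Str.isIn ":" (String.ofList r) then
        d.modify (PySem.Str.strip
          (((PySem.Str.splitMax? (String.ofList r) ":" 1).getD []).headD "")) 0 (· + 1)
      else d) = pvStepLine d r := by
  have htl : (String.ofList r).toList = r := by simp
  have hin : PySem.Str.isIn ":" (String.ofList r) = (':' ∈ r : Bool) := by
    rw [PySem.Str.isIn, htl]
    have : (":" : String).toList = [':'] := by decide
    rw [this, pvIsIn_colon]
  have hsm : PySem.Str.splitMax? (String.ofList r) ":" 1
      = some (((r.takeWhile (· ≠ ':')) :: pvMaxRest 0 r).map String.ofList) := by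
    rw [PySem.Str.splitMax?, htl]
    have hsep : (":" : String).toList = [':'] := by decide
    rw [hsep]
    have : PySem.Chars.splitMax? r [':'] 1 = some (PySem.Chars.splitOnMax r [':'] 1) := by
      simp [PySem.Chars.splitMax?]
    rw [this]
    unfold PySem.Chars.splitOnMax
    rw [if_neg (by omega)]
    have h1 : (1 : Int).toNat = 0 + 1 := rfl
    rw [h1, pvSplitOnMaxGo_succ r (r.length + 1) 0 [] [] (by omega)]
    simp
  rw [hin, hsm]
  simp only [Option.getD_some, List.map_cons, List.headD_cons]
  by_cases hmem : ':' ∈ r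
  · simp only [hmem, decide_true, if_true, pvStepLine, pvLineVal, Bool.false_eq_true,
      if_false, hmem, if_true, pvIncr, List.nil_append]
    congr 1
    simp [PySem.Str.strip]
  · simp [hmem, pvStepLine, pvLineVal]

-- ===== VERDICT (by name: the statement is the Claim_ definition above) =====
theorem extract_speakers_spec : Claim_equal_extract_speakers := by
  intro text _
  unfold Spec_extract_speakers extract_speakers extract_speakers_alt
  -- rewrite A's line list
  have hsplit : (PySem.Str.split? text "\n").getD []
      = ((text.toList.splitOnP (· == '\n')).map String.ofList) := by
    rw [PySem.Str.split?]
    have hsep : ("\n" : String).toList = ['\n'] := by decide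
    rw [hsep]
    have : PySem.Chars.split? text.toList ['\n']
        = some (PySem.Chars.splitOn text.toList ['\n']) := by
      simp [PySem.Chars.split?]
    rw [this, pvSplitOn_single]
    simp
  rw [hsplit]
  -- B's side: the scan lemma
  have hB := pvScan text.toList PySem.Dict.empty [] false
  obtain ⟨a, t, hsp⟩ : ∃ a t, text.toList.splitOnP (· == '\n') = a :: t := by
    cases hx : text.toList.splitOnP (· == '\n') with
    | nil => exact absurd hx (List.splitOnP_ne_nil _ _)
    | cons a t => exact ⟨a, t, rfl⟩
  rw [hsp] at hB ⊢
  simp only [List.tail_cons, List.headI] at hB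
  have hBdict : pvFlush (text.toList.foldl pvScanStep (PySem.Dict.empty, [], false))
      = (a :: t).foldl pvStepLine PySem.Dict.empty := by
    rw [hB, List.foldl_cons]
    rfl
  -- A's fold over strings = fold over char lines
  have hA : ((a :: t).map String.ofList).foldl
      (fun d line =>
        if PySem.Str.isIn ":" line then
          d.modify (PySem.Str.strip (((PySem.Str.splitMax? line ":" 1).getD []).headD "")) 0 (· + 1)
        else d)
      (PySem.Dict.empty : PySem.Dict String Int)
      = (a :: t).foldl pvStepLine PySem.Dict.empty := by
    rw [List.foldl_map]
    apply List.foldl_ext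
    intro d r _
    exact pvStepA_eq d r
  simp only []
  rw [hA, ← hBdict]
  rfl
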